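-- pv_equiv track=rewrite | github.com/cirosantilli/project-euler-solutions | solvers/989.py | brute_fibonacci_sum
-- ===== SOURCE A (Python) =====
-- from typing import List, Sequence, Tuple
--
-- MOD: int = 1_000_000_009
--
-- def brute_g(n: int) -> int:
--     count: int = 0
--     for x in range(n):
--         if (x * x - x - 1) % n == 0:
--             count += 1
--     return count
--
-- def brute_fibonacci_sum(limit: int) -> int:
--     fib: List[int] = [0] * (limit + 1)
--     if limit >= 1:
--         fib[1] = 1
--     if limit >= 2:
--         fib[2] = 1
--     for n in range(3, limit + 1):
--         fib[n] = (fib[n - 1] + fib[n - 2]) % MOD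
--
--     total: int = 0
--     for n in range(1, limit + 1):
--         total = (total + fib[n] * brute_g(n)) % MOD
--     return total
-- ===== SOURCE B (Python) =====
-- MOD: int = 1_000_000_009
--
-- def brute_fibonacci_sum(limit: int) -> int:
--     # Loop inversion: instead of, for each modulus n, scanning all x in [0, n)
--     # for roots of x^2 - x - 1, iterate over x once and enumerate the moduli as
--     # the divisors n of |x^2 - x - 1| with x < n <= limit, found by trial
--     # division up to sqrt; each such n contributes fib[n] to the total.
--     fib = [0, 1]
--     for _ in range(2, limit + 1):
--         fib.append((fib[-1] + fib[-2]) % MOD)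
--     total = 0
--     for x in range(limit):
--         v = x * x - x - 1
--         if v < 0:
--             v = -v
--         i = 1
--         while i * i <= v:
--             if v % i == 0:
--                 j = v // i
--                 if x < i <= limit:
--                     total += fib[i]
--                 if j != i and x < j <= limit:
--                     total += fib[j]
--             i += 1
--     return total % MOD
-- ===== Notes on version B (the rewrite author's own statement) =====
-- stated objective: alternative
-- what changed: B inverts the loop structure: instead of counting, for each modulus n, the roots of x^2-x-1 by scanning every residue below n, it iterates over the residues x once and enumerates the contributing moduli as the divisors of |x^2-x-1| that exceed x, found by trial division up to the square root, adding the corresponding Fibonacci entry per divisor; the Fibonacci table is grown by appending rather than preallocated and written in place.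
import Mathlib
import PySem

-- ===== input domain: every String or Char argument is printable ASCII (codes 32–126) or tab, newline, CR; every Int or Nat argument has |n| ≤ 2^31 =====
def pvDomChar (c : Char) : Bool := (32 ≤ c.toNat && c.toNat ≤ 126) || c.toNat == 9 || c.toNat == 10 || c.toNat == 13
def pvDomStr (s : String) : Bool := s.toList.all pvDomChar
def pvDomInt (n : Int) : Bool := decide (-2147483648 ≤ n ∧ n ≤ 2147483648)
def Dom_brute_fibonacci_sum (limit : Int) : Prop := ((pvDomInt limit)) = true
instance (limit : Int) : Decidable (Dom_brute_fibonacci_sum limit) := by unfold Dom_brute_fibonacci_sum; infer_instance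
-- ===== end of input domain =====

-- B inverts the loops: instead of scanning, for each modulus n, all x in [0,n) for roots of
-- x^2-x-1, it iterates over x once and enumerates the moduli as the divisors n of |x^2-x-1|
-- with x < n <= limit found by trial division up to sqrt (alternative algorithm, same result).

-- ===== PORT A =====
def brute_g (n : Int) : Int :=
  (PySem.List.pyRange 0 n 1).foldl
    (fun count x => if PySem.Int.mod (x * x - x - 1) n = 0 then count + 1 else count) 0

def brute_fibonacci_sum (limit : Int) : Int :=
  let fib0 : List Int := List.replicate (limit + 1).toNat 0
  let fib1 := if 1 ≤ limit then fib0.set 1 1 else fib0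
  let fib2 := if 2 ≤ limit then fib1.set 2 1 else fib1
  let fib := (PySem.List.pyRange 3 (limit + 1) 1).foldl
    (fun fib n => fib.set n.toNat
      (PySem.Int.mod (PySem.List.pyGetD fib (n - 1) 0 + PySem.List.pyGetD fib (n - 2) 0)
        1000000009)) fib2
  (PySem.List.pyRange 1 (limit + 1) 1).foldl
    (fun total n =>
      PySem.Int.mod (total + PySem.List.pyGetD fib n 0 * brute_g n) 1000000009) 0

-- ===== PORT B =====
-- the 'while i * i <= v' trial-division loop of Source B (i is the Python loop counter, kept as Nat)
def bDivLoop (v limit x : Int) (fib : List Int) (i : Nat) (total : Int) : Int :=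
  if h : (i : Int) * i ≤ v then
    let total' :=
      if PySem.Int.mod v i = 0 then
        let j := PySem.Int.floordiv v i
        let t1 := if x < (i : Int) ∧ (i : Int) ≤ limit then total + PySem.List.pyGetD fib (i : Int) 0 else total
        if j ≠ (i : Int) ∧ x < j ∧ j ≤ limit then t1 + PySem.List.pyGetD fib j 0 else t1
      else total
    bDivLoop v limit x fib (i + 1) total'
  else total
termination_by v.toNat + 1 - i
decreasing_by
  have h1 : (i : Int) ≤ v := by
    rcases Nat.eq_zero_or_pos i with h0 | h0
    · subst h0; simpa using h
    · have : (1 : Int) ≤ (i : Int) := by exact_mod_cast h0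
      nlinarith
  omega

-- fib table grown by appending (fib[-1], fib[-2] are Python negative indexing)
def bFib (limit : Int) : List Int :=
  (PySem.List.pyRange 2 (limit + 1) 1).foldl
    (fun fib _ =>
      fib ++ [PySem.Int.mod (PySem.List.pyGetD fib (-1) 0 + PySem.List.pyGetD fib (-2) 0) 1000000009])
    [0, 1]

def brute_fibonacci_sum_alt (limit : Int) : Int :=
  let fib := bFib limit
  PySem.Int.mod
    ((PySem.List.pyRange 0 limit 1).foldl
      (fun total x =>
        let v0 := x * x - x - 1
        let v := if v0 < 0 then -v0 else v0
        bDivLoop v limit x fib 1 total) 0)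
    1000000009

-- ===== PRECONDITION & SPEC =====
def Spec_brute_fibonacci_sum (limit : Int) (out : Int) : Prop := out = brute_fibonacci_sum_alt limit
instance (limit : Int) (out : Int) : Decidable (Spec_brute_fibonacci_sum limit out) := by unfold Spec_brute_fibonacci_sum; infer_instance

-- ===== CLAIM (what is proved, stated in full; the proofs are below) =====
def Claim_equal_brute_fibonacci_sum : Prop := ∀ (limit : Int), Dom_brute_fibonacci_sum limit → Spec_brute_fibonacci_sum limit (brute_fibonacci_sum limit)

-- ===== LEMMAS AND PROOFS =====

-- the Fibonacci-mod-1000000009 sequence both programs compute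
def fibm : Nat → Int
  | 0 => 0
  | 1 => 1
  | n + 2 => PySem.Int.mod (fibm (n + 1) + fibm n) 1000000009

-- |x^2 - x - 1| as a natural number
def Vx (x : Int) : Nat := (x * x - x - 1).natAbs

-- the common reference value: sum over moduli n of fibm n times the number of roots of
-- x^2-x-1 in [0,n), everything as indicator sums
def S (L : Nat) : Int :=
  ∑ n ∈ Finset.Icc 1 L, ∑ x ∈ Finset.range n, (if n ∣ Vx x then fibm n else 0)

-- ---------- A-side ----------

def refSum (limit : Int) : Int :=
  (PySem.List.pyRange 1 (limit + 1) 1).foldl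
    (fun total n => PySem.Int.mod (total + fibm n.toNat * brute_g n) 1000000009) 0

theorem fibfold_inv (limit : Int) :
    ∀ (k : Nat) (m : Int) (L : List Int), 3 ≤ m → m + k = limit + 1 →
    L.length = (limit + 1).toNat →
    (∀ i : Int, 0 ≤ i → i < m → PySem.List.pyGetD L i 0 = fibm i.toNat) →
    ((((PySem.List.pyRange m (limit + 1) 1).foldl
        (fun fib n => fib.set n.toNat
          (PySem.Int.mod (PySem.List.pyGetD fib (n - 1) 0 + PySem.List.pyGetD fib (n - 2) 0)
            1000000009)) L).length = (limit + 1).toNat) ∧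
      ∀ i : Int, 0 ≤ i → i < limit + 1 →
        PySem.List.pyGetD ((PySem.List.pyRange m (limit + 1) 1).foldl
          (fun fib n => fib.set n.toNat
            (PySem.Int.mod (PySem.List.pyGetD fib (n - 1) 0 + PySem.List.pyGetD fib (n - 2) 0)
              1000000009)) L) i 0 = fibm i.toNat) := by
  intro k
  induction k with
  | zero =>
    intro m L hm hk hlen hinv
    rw [PySem.List.pyRange_one_eq_nil (by omega)]
    exact ⟨hlen, fun i h0 hi => hinv i h0 (by omega)⟩
  | succ k ih =>
    intro m L hm hk hlen hinv
    rw [PySem.List.pyRange_one_cons (by omega), List.foldl_cons]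
    apply ih (m + 1) _ (by omega) (by omega) (by simpa using hlen)
    intro i h0 hi
    have hmlen : m.toNat < L.length := by omega
    by_cases he : i = m
    · subst he
      have h1 : PySem.List.pyGetD L (i - 1) 0 = fibm (i - 1).toNat :=
        hinv (i - 1) (by omega) (by omega)
      have h2 : PySem.List.pyGetD L (i - 2) 0 = fibm (i - 2).toNat :=
        hinv (i - 2) (by omega) (by omega)
      rw [PySem.List.pyGetD_of_nonneg _ _ h0, List.getD_eq_getElem?_getD,
        List.getElem?_set, if_pos rfl, if_pos hmlen, h1, h2]
      have hj : i.toNat = (i - 2).toNat + 2 := by omega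
      have hj1 : (i - 1).toNat = (i - 2).toNat + 1 := by omega
      simp [hj, hj1, fibm]
    · have hlt : i < m := by omega
      rw [PySem.List.pyGetD_of_nonneg _ _ h0, List.getD_eq_getElem?_getD,
        List.getElem?_set, if_neg (by omega), ← List.getD_eq_getElem?_getD,
        ← PySem.List.pyGetD_of_nonneg _ _ h0]
      exact hinv i h0 hlt

theorem init_entries (limit : Int) (h : 3 ≤ limit) :
    ∀ i : Int, 0 ≤ i → i < 3 →
      PySem.List.pyGetD ((List.replicate (limit + 1).toNat (0 : Int)).set 1 1 |>.set 2 1) i 0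
        = fibm i.toNat := by
  intro i h0 hi
  have hlen : 2 < (List.replicate (limit + 1).toNat (0 : Int)).length := by simp; omega
  have hp0 : (0 : Int) ≤ limit := by omega
  have hp1 : (0 : Int) < limit := by omega
  have hp2 : (1 : Int) < limit := by omega
  rcases (show i = 0 ∨ i = 1 ∨ i = 2 by omega) with rfl | rfl | rfl <;>
    simp_all [PySem.List.pyGetD_of_nonneg, List.getD_eq_getElem?_getD, fibm]

theorem total_loop (limit : Int) (fib : List Int)
    (hfib : ∀ i : Int, 0 ≤ i → i < limit + 1 → PySem.List.pyGetD fib i 0 = fibm i.toNat) :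
    (PySem.List.pyRange 1 (limit + 1) 1).foldl
      (fun total n => PySem.Int.mod (total + PySem.List.pyGetD fib n 0 * brute_g n) 1000000009) 0
    = refSum limit := by
  unfold refSum
  apply PySem.List.foldl_congr_mem
  intro acc n hn
  rw [PySem.List.mem_pyRange_one] at hn
  rw [hfib n (by omega) (by omega)]

theorem A_eq_ref (limit : Int) : brute_fibonacci_sum limit = refSum limit := by
  rcases (show limit ≤ 0 ∨ limit = 1 ∨ limit = 2 ∨ 3 ≤ limit by omega) with h | h | h | h
  · unfold brute_fibonacci_sum refSum
    rw [PySem.List.pyRange_one_eq_nil (show limit + 1 ≤ 1 by omega)]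
    rfl
  · subst h; decide
  · subst h; decide
  · have hfib := fibfold_inv limit (limit - 2).toNat 3
      ((List.replicate (limit + 1).toNat (0 : Int)).set 1 1 |>.set 2 1)
      (by omega) (by omega) (by simp) (init_entries limit h)
    unfold brute_fibonacci_sum
    split_ifs with h1 h2
    · exact total_loop limit _ hfib.2
    · omega
    · omega
    · omega

-- running mod at every step is mod of the plain sum
theorem foldl_mod_sum (l : List Int) (h : Int → Int) (a : Int) :
    l.foldl (fun t n => PySem.Int.mod (t + h n) 1000000009) (PySem.Int.mod a 1000000009)
      = PySem.Int.mod (a + (l.map h).sum) 1000000009 := by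
  induction l generalizing a with
  | nil => simp
  | cons n l ih =>
    rw [List.foldl_cons,
      show PySem.Int.mod (PySem.Int.mod a 1000000009 + h n) 1000000009
        = PySem.Int.mod (a + h n) 1000000009 by
        rw [PySem.Int.mod_eq_emod_of_pos (by norm_num), PySem.Int.mod_eq_emod_of_pos (by norm_num),
          PySem.Int.mod_eq_emod_of_pos (by norm_num), Int.emod_add_emod],
      ih]
    simp [add_assoc]

-- brute_g as an indicator sum over Finset.range
theorem brute_g_aux (n : Nat) :
    (PySem.List.pyRange 0 (n:Int) 1).foldl
      (fun count x => if PySem.Int.mod (x * x - x - 1) (n:Int) = 0 then count + 1 else count) 0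
      = ∑ x ∈ Finset.range n, (if n ∣ Vx x then (1 : Int) else 0) := by
  rw [show (fun (count : Int) x => if PySem.Int.mod (x * x - x - 1) (n:Int) = 0 then count + 1 else count)
      = (fun count x => if (fun x => decide (PySem.Int.mod (x * x - x - 1) (n:Int) = 0)) x = true then count + 1 else count) by
    funext c x; simp]
  rw [PySem.List.foldl_count_if, zero_add, PySem.List.pyRange_zero_natCast, List.countP_map]
  rw [show ∀ m : Nat, ((m:Nat):Int) = (m:Int) from fun _ => rfl]
  rw [show (∑ x ∈ Finset.range n, (if n ∣ Vx x then (1 : Int) else 0))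
      = ((List.range n).map (fun x : Nat => if (fun x : Nat => decide (n ∣ Vx (x:Int))) x = true then (1:Int) else 0)).sum by
    simp only [decide_eq_true_eq]; rfl]
  rw [PySem.List.sum_map_ite_one_zero]
  rw [Int.ofNat_inj]
  apply List.countP_congr
  intro x _
  simp only [Function.comp, decide_eq_true_eq]
  rw [PySem.Int.mod_eq_zero_iff_dvd]
  unfold Vx
  rw [← Int.natAbs_dvd_natAbs, Int.natAbs_natCast]

theorem brute_g_eq (n : Nat) :
    brute_g (n : Int) = ∑ x ∈ Finset.range n, (if n ∣ Vx x then (1 : Int) else 0) := by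
  unfold brute_g
  exact brute_g_aux n

-- A's value is mod (S L) for limit = L ≥ 0
theorem A_eq_S (limit : Int) (h : 0 ≤ limit) :
    brute_fibonacci_sum limit = PySem.Int.mod (S limit.toNat) 1000000009 := by
  rw [A_eq_ref]
  unfold refSum
  rw [show (0:Int) = PySem.Int.mod 0 1000000009 from rfl, foldl_mod_sum, zero_add]
  congr 1
  rw [PySem.List.pyRange_one, List.map_map, show (limit + 1 - 1).toNat = limit.toNat by omega]
  unfold S
  rw [show Finset.Icc 1 limit.toNat = Finset.Ico 1 (limit.toNat + 1) from rfl,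
    Finset.sum_Ico_eq_sum_range]
  rw [show (((List.range limit.toNat).map
      ((fun n : Int => fibm n.toNat * brute_g n) ∘ (fun k : Nat => (1:Int) + (k:Int)))).sum)
      = ∑ k ∈ Finset.range limit.toNat,
          fibm ((1:Int) + (k:Int)).toNat * brute_g ((1:Int) + (k:Int)) from rfl]
  rw [show limit.toNat + 1 - 1 = limit.toNat from rfl]
  apply Finset.sum_congr rfl
  intro k _
  have hc : ((1:Int) + (k:Int)) = ((1 + k : Nat) : Int) := by push_cast; ring
  rw [hc, Int.toNat_natCast, brute_g_eq (1 + k), Finset.mul_sum]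
  apply Finset.sum_congr rfl
  intro x _
  rw [mul_ite, mul_one, mul_zero]

-- ---------- B-side ----------

-- fib list built by appending is the fibm table
theorem bFib_inv : ∀ (k : Nat),
    (PySem.List.pyRange 2 (2 + (k : Int)) 1).foldl
      (fun fib _ =>
        fib ++ [PySem.Int.mod (PySem.List.pyGetD fib (-1) 0 + PySem.List.pyGetD fib (-2) 0) 1000000009])
      [0, 1]
    = (List.range (k + 2)).map (fun t => fibm t) := by
  intro k
  induction k with
  | zero =>
    rw [show ((0:Nat):Int) = 0 from rfl, add_zero, PySem.List.pyRange_one_eq_nil (by omega)]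
    simp [List.range_succ, fibm]
  | succ k ih =>
    rw [show (2 + ((k+1:Nat):Int)) = (2 + (k:Int)) + 1 by push_cast; ring,
      PySem.List.pyRange_one_succ_right (by omega), List.foldl_append, ih,
      List.foldl_cons, List.foldl_nil]
    set L := (List.range (k + 2)).map (fun t => fibm t) with hL
    have hlen : L.length = k + 2 := by simp [hL]
    rw [PySem.List.pyGetD_neg_ofNat L 1 0 (by omega) (by omega),
        PySem.List.pyGetD_neg_ofNat L 2 0 (by omega) (by omega)]
    have e1 : L[L.length - 1] = fibm (k + 1) := by
      simp [hL]
    have e2 : L[L.length - 2] = fibm k := by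
      simp [hL]
    rw [e1, e2, show (k + 1) + 2 = (k + 2) + 1 from rfl, List.range_succ, List.map_append]
    rfl

theorem bFib_entry (limit : Int) (d : Nat) (h1 : 1 ≤ limit) (hd : (d : Int) ≤ limit) :
    PySem.List.pyGetD (bFib limit) (d : Int) 0 = fibm d := by
  have hk : limit + 1 = 2 + ((limit - 1).toNat : Int) := by omega
  unfold bFib
  rw [hk, bFib_inv]
  rw [PySem.List.pyGetD_natCast]
  rw [List.getD_eq_getElem?_getD, List.getElem?_map, List.getElem?_range (by omega)]
  rfl

-- contribution of the small divisors ≥ i together with their cofactors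
def smallSum (V : Nat) (i : Nat) (h : Nat → Int) : Int :=
  ∑ d ∈ V.divisors.filter (fun d => i ≤ d ∧ d * d ≤ V), (h d + if V / d ≠ d then h (V / d) else 0)

theorem smallSum_stop (V i : Nat) (hstop : V < i * i) (h : Nat → Int) : smallSum V i h = 0 := by
  unfold smallSum
  rw [Finset.filter_false_of_mem, Finset.sum_empty]
  intro d _
  simp only [not_and]
  intro hid
  have := Nat.mul_le_mul hid hid
  omega

theorem smallSum_step (V i : Nat) (hdvd : i ∣ V) (hii : i * i ≤ V) (hi : 1 ≤ i) (h : Nat → Int) :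
    smallSum V i h = (h i + if V / i ≠ i then h (V / i) else 0) + smallSum V (i + 1) h := by
  unfold smallSum
  have hV : V ≠ 0 := by nlinarith
  have hset : V.divisors.filter (fun d => i ≤ d ∧ d * d ≤ V)
      = insert i (V.divisors.filter (fun d => i + 1 ≤ d ∧ d * d ≤ V)) := by
    ext d
    simp only [Finset.mem_insert, Finset.mem_filter, Nat.mem_divisors]
    constructor
    · rintro ⟨hd, hle, hdd⟩
      by_cases he : d = i
      · exact Or.inl he
      · exact Or.inr ⟨hd, by omega, hdd⟩
    · rintro (rfl | ⟨hd, hle, hdd⟩)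
      · exact ⟨⟨hdvd, hV⟩, le_refl _, hii⟩
      · exact ⟨hd, by omega, hdd⟩
  rw [hset, Finset.sum_insert (by simp only [Finset.mem_filter]; omega)]

theorem smallSum_skip (V i : Nat) (hdvd : ¬ i ∣ V) (h : Nat → Int) :
    smallSum V i h = smallSum V (i + 1) h := by
  unfold smallSum
  congr 1
  ext d
  simp only [Finset.mem_filter, Nat.mem_divisors]
  constructor
  · rintro ⟨⟨hd, hV⟩, hle, hdd⟩
    have : d ≠ i := by rintro rfl; exact hdvd hd
    exact ⟨⟨hd, hV⟩, by omega, hdd⟩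
  · rintro ⟨hd, hle, hdd⟩
    exact ⟨hd, by omega, hdd⟩

-- what the trial-division loop accumulates, from counter i on
theorem divLoop_eq (V : Nat) (limit x : Int) (fib : List Int) (_hx : 0 ≤ x)
    (hfib : ∀ d : Nat, 1 ≤ d → (d : Int) ≤ limit → PySem.List.pyGetD fib (d : Int) 0 = fibm d) :
    ∀ (fuel i : Nat) (total : Int), 1 ≤ i → V + 1 ≤ i + fuel →
      bDivLoop (V : Int) limit x fib i total
        = total + smallSum V i (fun d => if x < (d : Int) ∧ (d : Int) ≤ limit then fibm d else 0) := by
  intro fuel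
  induction fuel with
  | zero =>
    intro i total hi hfuel
    have hVi : V < i * i := by nlinarith
    rw [bDivLoop, dif_neg (not_le.mpr (by exact_mod_cast hVi)), smallSum_stop V i hVi]
    ring
  | succ fuel ih =>
    intro i total hi hfuel
    rw [bDivLoop]
    by_cases hle : (i : Int) * i ≤ (V : Int)
    · rw [dif_pos hle]
      have hleN : i * i ≤ V := by exact_mod_cast hle
      by_cases hdvd : i ∣ V
      · have hmod : PySem.Int.mod (V : Int) (i : Int) = 0 := by
          rw [PySem.Int.mod_eq_zero_iff_dvd]
          exact_mod_cast hdvd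
        have hj : PySem.Int.floordiv (V : Int) (i : Int) = ((V / i : Nat) : Int) :=
          PySem.Int.floordiv_natCast V i
        simp only [hmod, if_true, hj]
        rw [ih (i + 1) _ (by omega) (by omega), smallSum_step V i hdvd hleN hi]
        have hVi1 : (1:Nat) ≤ V / i := Nat.one_le_div_iff (by omega) |>.mpr (Nat.le_of_dvd (by nlinarith) hdvd)
        -- reduce the branch arithmetic
        by_cases c1 : x < (i : Int) ∧ (i : Int) ≤ limit
        · rw [if_pos c1, hfib i hi c1.2]
          by_cases c2 : ((V / i : Nat) : Int) ≠ (i : Int) ∧ x < ((V / i : Nat) : Int) ∧ ((V / i : Nat) : Int) ≤ limit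
          · rw [if_pos c2, hfib (V / i) hVi1 c2.2.2]
            rw [if_pos c1, if_pos (show V / i ≠ i by exact_mod_cast c2.1),
              if_pos (And.intro c2.2.1 c2.2.2)]
            ring
          · rw [if_neg c2, if_pos c1]
            have : (if V / i ≠ i then (if x < ((V/i:Nat):Int) ∧ ((V/i:Nat):Int) ≤ limit then fibm (V/i) else 0) else 0) = 0 := by
              split_ifs with d1 d2
              · exfalso; exact c2 ⟨by exact_mod_cast d1, d2.1, d2.2⟩
              · rfl
              · rfl
            rw [this]
            ring
        · rw [if_neg c1, if_neg (show ¬ (x < (i : Int) ∧ (i : Int) ≤ limit) from c1)]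
          by_cases c2 : ((V / i : Nat) : Int) ≠ (i : Int) ∧ x < ((V / i : Nat) : Int) ∧ ((V / i : Nat) : Int) ≤ limit
          · rw [if_pos c2, hfib (V / i) hVi1 c2.2.2]
            rw [if_pos (show V / i ≠ i by exact_mod_cast c2.1), if_pos (And.intro c2.2.1 c2.2.2)]
            ring
          · rw [if_neg c2]
            have : (if V / i ≠ i then (if x < ((V/i:Nat):Int) ∧ ((V/i:Nat):Int) ≤ limit then fibm (V/i) else 0) else 0) = 0 := by
              split_ifs with d1 d2
              · exfalso; exact c2 ⟨by exact_mod_cast d1, d2.1, d2.2⟩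
              · rfl
              · rfl
            rw [this]
            ring
      · have hmod : ¬ PySem.Int.mod (V : Int) (i : Int) = 0 := by
          rw [PySem.Int.mod_eq_zero_iff_dvd]
          exact_mod_cast hdvd
        rw [if_neg hmod, ih (i + 1) _ (by omega) (by omega), smallSum_skip V i hdvd]
    · rw [dif_neg hle]
      have hVi : ¬ (i * i ≤ V) := by exact_mod_cast hle
      rw [smallSum_stop V i (by omega)]
      ring

-- sqrt pairing: summing h d + h (V/d) over the small divisors is summing h over all divisors
theorem pairing (V : Nat) (hV : 1 ≤ V) (h : Nat → Int) :
    smallSum V 1 h = ∑ d ∈ V.divisors, h d := by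
  unfold smallSum
  have hone : V.divisors.filter (fun d => 1 ≤ d ∧ d * d ≤ V) = V.divisors.filter (fun d => d * d ≤ V) := by
    ext d
    simp only [Finset.mem_filter, Nat.mem_divisors]
    constructor
    · rintro ⟨hd, _, hdd⟩; exact ⟨hd, hdd⟩
    · rintro ⟨hd, hdd⟩
      exact ⟨hd, Nat.pos_of_dvd_of_pos hd.1 (by omega), hdd⟩
  rw [hone, Finset.sum_add_distrib]
  -- second summand: sum of h (V/d) over small divisors with V/d ≠ d = sum of h over large divisors
  have hsplit : ∑ d ∈ V.divisors, h d
      = ∑ d ∈ V.divisors.filter (fun d => d * d ≤ V), h d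
        + ∑ d ∈ V.divisors.filter (fun d => ¬ d * d ≤ V), h d :=
    (Finset.sum_filter_add_sum_filter_not _ _ _).symm
  rw [hsplit]
  congr 1
  -- ∑_{small} (if V/d ≠ d then h (V/d) else 0) = ∑_{large} h d
  rw [← Finset.sum_filter, Finset.filter_filter]
  refine Finset.sum_nbij' (fun d => V / d) (fun d => V / d) ?_ ?_ ?_ ?_ ?_
  · intro d hd
    simp only [Finset.mem_filter, Nat.mem_divisors] at hd ⊢
    obtain ⟨⟨hdvd, hV0⟩, hdd, hne⟩ := hd
    have he : V / d * d = V := Nat.div_mul_cancel hdvd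
    have hdpos : 0 < d := Nat.pos_of_dvd_of_pos hdvd (by omega)
    have hlt : d < V / d := by
      rcases Nat.lt_or_ge d (V / d) with hc | hc
      · exact hc
      · exfalso
        have : V / d = d := le_antisymm (by nlinarith) (by nlinarith)
        exact hne this
    refine ⟨⟨Nat.div_dvd_of_dvd hdvd, hV0⟩, ?_⟩
    nlinarith
  · intro d hd
    simp only [Finset.mem_filter, Nat.mem_divisors] at hd ⊢
    obtain ⟨⟨hdvd, hV0⟩, hdd⟩ := hd
    have he : V / d * d = V := Nat.div_mul_cancel hdvd
    have hdpos : 0 < d := Nat.pos_of_dvd_of_pos hdvd (by omega)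
    have hqpos : 0 < V / d := Nat.div_pos (Nat.le_of_dvd (by omega) hdvd) hdpos
    have hlt : V / d < d := by nlinarith
    refine ⟨⟨Nat.div_dvd_of_dvd hdvd, hV0⟩, by nlinarith, ?_⟩
    rw [Nat.div_div_self hdvd (by omega)]
    omega
  · intro d hd
    simp only [Finset.mem_filter, Nat.mem_divisors] at hd
    exact Nat.div_div_self hd.1.1 (by omega)
  · intro d hd
    simp only [Finset.mem_filter, Nat.mem_divisors] at hd
    exact Nat.div_div_self hd.1.1 (by omega)
  · intro d _
    rfl

-- per x: the divisor sum, restricted by the guards, as a sum over the moduli 1..L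
theorem divisors_to_Icc (V : Nat) (hV : 1 ≤ V) (L : Nat) (limit x : Int)
    (hL : limit = (L : Int)) (hx : 0 ≤ x) :
    (∑ d ∈ V.divisors, (if x < (d : Int) ∧ (d : Int) ≤ limit then fibm d else 0))
      = ∑ n ∈ Finset.Icc 1 L, (if n ∣ V ∧ x < (n : Int) then fibm n else 0) := by
  rw [← Finset.sum_filter, ← Finset.sum_filter]
  apply Finset.sum_congr _ (fun _ _ => rfl)
  ext d
  simp only [Finset.mem_filter, Nat.mem_divisors, Finset.mem_Icc, hL]
  constructor
  · rintro ⟨⟨hdvd, hV0⟩, hxd, hdl⟩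
    have : 1 ≤ d := by omega
    exact ⟨⟨this, by exact_mod_cast hdl⟩, hdvd, hxd⟩
  · rintro ⟨⟨h1, h2⟩, hdvd, hxd⟩
    exact ⟨⟨hdvd, by omega⟩, hxd, by exact_mod_cast h2⟩

-- x*x - x - 1 is never 0 on the integers
theorem fInt_ne_zero (x : Int) : x * x - x - 1 ≠ 0 := by
  intro h
  rcases (show x ≤ -1 ∨ x = 0 ∨ x = 1 ∨ 2 ≤ x by omega) with h1 | h1 | h1 | h1
  · nlinarith
  · subst h1; norm_num at h
  · subst h1; norm_num at h
  · nlinarith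

theorem B_eq_S (limit : Int) (h : 0 ≤ limit) :
    brute_fibonacci_sum_alt limit = PySem.Int.mod (S limit.toNat) 1000000009 := by
  rcases (show limit = 0 ∨ 1 ≤ limit by omega) with rfl | hpos
  · rfl
  · have hL : limit = ((limit.toNat : Nat) : Int) := by omega
    show PySem.Int.mod
      ((PySem.List.pyRange 0 limit 1).foldl
        (fun total x =>
          let v0 := x * x - x - 1
          let v := if v0 < 0 then -v0 else v0
          bDivLoop v limit x (bFib limit) 1 total) 0) 1000000009
      = PySem.Int.mod (S limit.toNat) 1000000009
    congr 1
    have hbody : ∀ (total x : Int), 0 ≤ x → x < limit →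
        (let v0 := x * x - x - 1
         let v := if v0 < 0 then -v0 else v0
         bDivLoop v limit x (bFib limit) 1 total)
        = total + ∑ n ∈ Finset.Icc 1 limit.toNat,
            (if n ∣ Vx x ∧ x < (n : Int) then fibm n else 0) := by
      intro total x hx0 hxl
      have hveq : (if x * x - x - 1 < 0 then -(x * x - x - 1) else x * x - x - 1)
          = ((Vx x : Nat) : Int) := by
        unfold Vx
        rcases lt_or_ge (x * x - x - 1) 0 with hv | hv
        · rw [if_pos hv]; omega
        · rw [if_neg (not_lt.mpr hv)]; omega
      have hV1 : 1 ≤ Vx x := by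
        have := fInt_ne_zero x
        unfold Vx
        omega
      show bDivLoop (if x * x - x - 1 < 0 then -(x * x - x - 1) else x * x - x - 1)
          limit x (bFib limit) 1 total = _
      rw [hveq,
        divLoop_eq (Vx x) limit x (bFib limit) hx0
          (fun d hd1 hdl => bFib_entry limit d hpos hdl) (Vx x + 1) 1 total (by omega) (by omega),
        pairing (Vx x) hV1, divisors_to_Icc (Vx x) hV1 limit.toNat limit x hL hx0]
    rw [PySem.List.foldl_congr_mem (PySem.List.pyRange 0 limit 1) _
      (fun total x => total + ∑ n ∈ Finset.Icc 1 limit.toNat,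
        (if n ∣ Vx x ∧ x < (n : Int) then fibm n else 0)) 0
      (fun total x hmem => hbody total x
        (by rw [PySem.List.mem_pyRange_one] at hmem; omega)
        (by rw [PySem.List.mem_pyRange_one] at hmem; omega)),
      PySem.List.foldl_add, zero_add]
    rw [show PySem.List.pyRange 0 limit 1 = (List.range limit.toNat).map Nat.cast by
        rw [hL]; exact PySem.List.pyRange_zero_natCast _, List.map_map]
    rw [show (((List.range limit.toNat).map
        ((fun x : Int => ∑ n ∈ Finset.Icc 1 limit.toNat,
            (if n ∣ Vx x ∧ x < (n : Int) then fibm n else 0)) ∘ (Nat.cast))).sum)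
        = ∑ x ∈ Finset.range limit.toNat, ∑ n ∈ Finset.Icc 1 limit.toNat,
            (if n ∣ Vx (x : Int) ∧ (x : Int) < (n : Int) then fibm n else 0) from rfl]
    rw [Finset.sum_comm]
    unfold S
    apply Finset.sum_congr rfl
    intro n hn
    rw [Finset.mem_Icc] at hn
    have hstep : ∀ x : Nat,
        (if n ∣ Vx (x : Int) ∧ (x : Int) < (n : Int) then fibm n else 0)
        = (if x < n then (if n ∣ Vx (x : Int) then fibm n else 0) else 0) := by
      intro x
      have : ((x : Int) < (n : Int)) ↔ x < n := by exact_mod_cast Iff.rfl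
      split_ifs with c1 c2 c3 <;> first | rfl | (exfalso; tauto)
    rw [Finset.sum_congr rfl (fun x _ => hstep x), ← Finset.sum_filter]
    apply Finset.sum_congr _ (fun _ _ => rfl)
    ext x
    simp only [Finset.mem_filter, Finset.mem_range]
    omega

-- ===== VERDICT (by name: the statement is the Claim_ definition above) =====
theorem brute_fibonacci_sum_spec : Claim_equal_brute_fibonacci_sum := by
  intro limit _
  show brute_fibonacci_sum limit = brute_fibonacci_sum_alt limit
  rcases (show 0 ≤ limit ∨ limit < 0 by omega) with h | h
  · rw [A_eq_S limit h, B_eq_S limit h]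
  · rw [A_eq_ref limit]
    unfold refSum brute_fibonacci_sum_alt
    rw [PySem.List.pyRange_one_eq_nil (by omega), PySem.List.pyRange_one_eq_nil (by omega)]
    rfl
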